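-- pv_equiv track=rewrite | github.com/masudrumii/World-Cup-Data-Analysis | wc_functions.py | total_match_played
-- ===== SOURCE A (Python) =====
-- def total_match_played(all_teams):
--
--     total_match_played = {}
--
--     for teams in all_teams:
--         for team, quantity in teams:
--             if team not in total_match_played.keys():
--                 total_match_played[team] = quantity
--             else:
--                 total_match_played[team] = total_match_played[team] + quantity
--     return total_match_played
-- ===== SOURCE B (Python) =====
-- def total_match_played(all_teams):
--     flat = [pair for teams in all_teams for pair in teams]
--     return {team: sum(q for t, q in flat if t == team)
--             for team in dict.fromkeys(t for t, _ in flat)}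
-- ===== Notes on version B (the rewrite author's own statement) =====
-- stated objective: alternative
-- what changed: Replaces A's online membership-test accumulation into a dict by flattening once, deduplicating team names in first-occurrence order, and computing each team's total as a sum over the flat sequence.
import Mathlib
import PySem

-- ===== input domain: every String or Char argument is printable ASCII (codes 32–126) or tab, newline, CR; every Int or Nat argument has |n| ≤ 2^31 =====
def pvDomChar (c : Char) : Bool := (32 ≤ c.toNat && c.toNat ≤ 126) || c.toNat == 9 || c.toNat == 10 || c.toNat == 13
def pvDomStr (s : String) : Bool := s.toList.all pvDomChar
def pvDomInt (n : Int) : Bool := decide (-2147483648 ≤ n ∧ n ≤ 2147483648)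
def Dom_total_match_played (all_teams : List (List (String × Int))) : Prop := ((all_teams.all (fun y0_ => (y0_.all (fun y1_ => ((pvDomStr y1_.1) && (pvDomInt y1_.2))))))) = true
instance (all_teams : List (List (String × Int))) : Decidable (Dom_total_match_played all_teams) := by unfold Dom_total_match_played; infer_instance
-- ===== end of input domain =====

-- B replaces A's online dict accumulation by flatten → dedup keys in first-occurrence order → per-key sum (alternative decomposition, not claimed faster).


-- ===== PORT A =====
def total_match_played (all_teams : List (List (String × Int))) : List (String × Int) :=
  (all_teams.foldl
    (fun d teams =>
      teams.foldl
        (fun d p =>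
          if d.contains p.1 = false then d.insert p.1 p.2
          else d.insert p.1 (d.getD p.1 0 + p.2))
        d)
    PySem.Dict.empty).items

-- ===== PORT B =====
def total_match_played_alt (all_teams : List (List (String × Int))) : List (String × Int) :=
  let flat := all_teams.flatten
  (PySem.List.dedup (flat.map (fun p => p.1))).map
    (fun team => (team, ((flat.filter (fun p => p.1 == team)).map (fun p => p.2)).sum))

-- ===== PRECONDITION & SPEC =====
def Spec_total_match_played (all_teams : List (List (String × Int))) (out : List (String × Int)) : Prop := out = total_match_played_alt all_teams
instance (all_teams : List (List (String × Int))) (out : List (String × Int)) : Decidable (Spec_total_match_played all_teams out) := by unfold Spec_total_match_played; infer_instance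

-- ===== CLAIM (what is proved, stated in full; the proofs are below) =====
def Claim_equal_total_match_played : Prop := ∀ (all_teams : List (List (String × Int))), Dom_total_match_played all_teams → Spec_total_match_played all_teams (total_match_played all_teams)

-- ===== LEMMAS AND PROOFS =====

-- A's inner-loop body, named for the proofs (definitionally the lambda in the port of A)
def pvStep (d : PySem.Dict String Int) (p : String × Int) : PySem.Dict String Int :=
  if d.contains p.1 = false then d.insert p.1 p.2
  else d.insert p.1 (d.getD p.1 0 + p.2)

-- B's per-team total, named for the proofs
def pvSumFor (flat : List (String × Int)) (t : String) : Int :=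
  ((flat.filter (fun p => p.1 == t)).map (fun p => p.2)).sum

lemma pvStep_eq (d : PySem.Dict String Int) (p : String × Int) :
    pvStep d p = d.insert p.1 (d.getD p.1 0 + p.2) := by
  unfold pvStep
  split
  · next h => rw [PySem.Dict.getD_of_not_contains d 0 h, zero_add]
  · rfl

lemma pvSumFor_cons (p : String × Int) (rest : List (String × Int)) (t : String) :
    pvSumFor (p :: rest) t = (if p.1 = t then p.2 else 0) + pvSumFor rest t := by
  unfold pvSumFor
  rw [List.filter_cons]
  by_cases h : p.1 = t
  · simp [h]
  · simp [h]

lemma pvGetD_foldl (flat : List (String × Int)) :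
    ∀ (d : PySem.Dict String Int) (k : String),
      (flat.foldl pvStep d).getD k 0 = d.getD k 0 + pvSumFor flat k := by
  induction flat with
  | nil => intro d k; simp [pvSumFor]
  | cons p rest ih =>
    intro d k
    rw [List.foldl_cons, ih, pvStep_eq, PySem.Dict.getD_insert, pvSumFor_cons]
    by_cases h : k = p.1
    · subst h; simp; ring
    · have h2 : p.1 ≠ k := fun e => h e.symm
      simp [h, h2]

lemma pvStep_keys (d : PySem.Dict String Int) (p : String × Int) :
    (pvStep d p).keys = PySem.Set.add d.keys p.1 := by
  rw [pvStep_eq]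
  unfold PySem.Set.add
  by_cases h : d.contains p.1 = true
  · rw [PySem.Dict.keys_insert_of_contains d _ h]
    have hm : p.1 ∈ d.keys := (PySem.Dict.contains_iff_mem_keys d p.1).mp h
    simp [hm]
  · have h' : d.contains p.1 = false := by
      cases hc : d.contains p.1
      · rfl
      · exact absurd hc h
    rw [PySem.Dict.keys_insert_of_not_contains d _ h']
    have hm : p.1 ∉ d.keys := fun hmem => h ((PySem.Dict.contains_iff_mem_keys d p.1).mpr hmem)
    simp [hm]

lemma pvKeys_foldl (flat : List (String × Int)) :
    ∀ (d : PySem.Dict String Int),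
      (flat.foldl pvStep d).keys = (flat.map (fun p => p.1)).foldl PySem.Set.add d.keys := by
  induction flat with
  | nil => intro d; rfl
  | cons p rest ih =>
    intro d
    rw [List.foldl_cons, ih, List.map_cons, List.foldl_cons, pvStep_keys]

lemma pvItems_eq_map_keys (d : PySem.Dict String Int) (h : d.keys.Nodup) :
    d.items = d.keys.map (fun k => (k, d.getD k 0)) := by
  have hk : d.keys = d.items.map (fun p => p.1) := rfl
  rw [hk, List.map_map]
  symm
  calc d.items.map ((fun k => (k, d.getD k 0)) ∘ fun p => p.1)
      = d.items.map id := by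
        apply List.map_congr_left
        intro p hp
        obtain ⟨k, v⟩ := p
        simp only [Function.comp, id]
        rw [PySem.Dict.getD_of_mem_items d hp h]
    _ = d.items := List.map_id d.items

-- ===== VERDICT (by name: the statement is the Claim_ definition above) =====
theorem total_match_played_spec : Claim_equal_total_match_played := by
  intro all_teams _
  unfold Spec_total_match_played total_match_played total_match_played_alt
  rw [show (fun (d : PySem.Dict String Int) (p : String × Int) =>
        if d.contains p.1 = false then d.insert p.1 p.2
        else d.insert p.1 (d.getD p.1 0 + p.2)) = pvStep from rfl,
      show (fun (d : PySem.Dict String Int) (teams : List (String × Int)) =>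
        teams.foldl pvStep d) = (fun d teams => List.foldl pvStep d teams) from rfl,
      ← List.foldl_flatten]
  set flat := all_teams.flatten with hflat
  have hkeys : (flat.foldl pvStep PySem.Dict.empty).keys
      = PySem.List.dedup (flat.map (fun p => p.1)) := by
    rw [pvKeys_foldl, PySem.Dict.keys_empty, PySem.List.dedup_eq_ofList]
    rfl
  have hnd : (flat.foldl pvStep PySem.Dict.empty).keys.Nodup := by
    rw [hkeys, PySem.List.dedup_eq_ofList]
    exact PySem.Set.nodup_ofList _
  rw [pvItems_eq_map_keys _ hnd, hkeys]
  apply List.map_congr_left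
  intro t _
  rw [pvGetD_foldl, PySem.Dict.getD_empty, zero_add]
  rfl
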